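-- pv_equiv track=rewrite | github.com/jliao1/PythonStudy | 九章基础班/排序/重新定义排序规则.py | mostVisitedPattern1
-- ===== SOURCE A (Python) =====
-- def mostVisitedPattern1(username, website, timestamp):
--     import collections
--     from itertools import combinations
--
--     TUW = tuple(zip(timestamp, username, website))
--     sortedTUW = sorted(TUW)
--     # (1, u'joe', u'home')
--
--     userHistory = collections.defaultdict(list)  # 它的values是list
--     for time, user, website in sortedTUW:
--         userHistory[user].append(website)
--     '''
--     以上3行可以这样写（1）： 不用导包
--     userHistory={}
--     for time,user,website in sortedTUW:
--         if user in userHistory: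
--             userHistory[user].append(website)
--         else:
--             userHistory[user] = [website]
--
--     以上3行还可以这样写（2）：不用导包
--     userHistory={}
--     for time,user,website in sortedTUW:
--         userHistory.setdefault(user,[])
--         userHistory[user].append(website)
--
--     最终出来的效果是：
--     {
--     u'james': [u'home', u'cart', u'maps', u'home'],
--     u'joe': [u'home', u'about', u'career'],
--     u'mary': [u'home', u'about', u'career']   }
--     '''
--
--     patternCount = collections.defaultdict(int)  # 它的value是integer
--     for user in userHistory.keys():
--         temp = combinations(userHistory[user], 3)  # 注意生成的组合竟然是 stable 的！！！
--         combs = set(temp)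
--         for comb in combs:
--             patternCount[comb] = patternCount[comb] + 1
--     '''
--     以上6句子还可以写成（1）
--     patternCount = {}
--     for user in userHistory.keys():
--         temp = combinations(userHistory[user], 3)
--         combs = set(temp)
--         for comb in combs:
--             if comb not in patternCount:
--                 patternCount[comb] = 1
--             else:
--                 patternCount[comb]=patternCount[comb]+1
--
--     以上6句子还可以写成（2）：
--     patternCount={}
--     for user in userHistory.keys():
--         temp = itertools.combinations(userHistory[user], 3)
--         combs = set(temp)
--         for comb in combs:
--             patternCount.setdefault(comb, 1)
--             patternCount[comb]=patternCount[comb]+1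
--     '''
--
--     def sortKey(pattern):  # pattern是字典里的每一个 key元素
--         return (-patternCount[pattern], pattern)
--
--     # 为啥字典可以排序，因为Dictionaries are ordered in Python 3.6
--     # 返回的 sorted_patternCount 是按 key=sortKey 规则后 的 keys的list
--     sorted_patternCount = sorted(patternCount, key=sortKey)
--     return sorted_patternCount[0]
-- ===== SOURCE B (Python) =====
-- def mostVisitedPattern1(username, website, timestamp):
--     from itertools import combinations
--
--     visits = list(zip(timestamp, username, website))
--     users = set(u for _, u, _ in visits)
--     hists = [[w for _, w in sorted((t, w) for t, u2, w in visits if u2 == u)]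
--              for u in users]
--     candidates = {p for h in hists for p in combinations(h, 3)}
--
--     def _contains(h, p):
--         it = iter(h)
--         return all(w in it for w in p)
--
--     def count(p):
--         return sum(1 for h in hists if _contains(h, p))
--
--     return min(candidates, key=lambda p: (-count(p), p))
-- ===== Notes on version B (the rewrite author's own statement) =====
-- stated objective: alternative
-- what changed: B removes A's pattern-count dictionary entirely: it builds each user's history list directly, collects the candidate 3-patterns into one set, counts each candidate by an iterator-based subsequence test against every user's history, and picks the answer with a single min over the candidates instead of A's global sort plus dict-increment counting.
import Mathlib
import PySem

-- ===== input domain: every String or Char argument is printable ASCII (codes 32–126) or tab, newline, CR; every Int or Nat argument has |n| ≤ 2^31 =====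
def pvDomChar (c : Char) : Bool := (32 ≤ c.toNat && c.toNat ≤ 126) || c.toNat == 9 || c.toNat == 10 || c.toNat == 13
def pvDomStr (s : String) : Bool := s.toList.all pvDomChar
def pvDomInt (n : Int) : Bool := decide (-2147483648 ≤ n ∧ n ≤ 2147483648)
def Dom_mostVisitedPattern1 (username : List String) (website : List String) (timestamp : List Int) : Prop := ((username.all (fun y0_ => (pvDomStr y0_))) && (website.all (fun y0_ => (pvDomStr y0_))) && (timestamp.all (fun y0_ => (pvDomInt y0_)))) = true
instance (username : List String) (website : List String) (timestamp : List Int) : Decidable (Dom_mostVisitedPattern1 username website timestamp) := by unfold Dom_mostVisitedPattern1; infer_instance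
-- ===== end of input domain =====

-- B drops A's pattern-count dict: it builds per-user histories directly, gathers the candidate
-- 3-patterns into one set, counts each candidate by an iterator-style subsequence test against
-- every history, and takes a single min over the candidates; objective: alternative algorithm.


-- ===== PORT A =====
-- Python tuples of a timestamp and two websites/usernames are compared lexicographically:
-- ported with the lexicographic order on `Lex (Int × Lex (String × String))`.
def pvKeyTUW (x : Int × String × String) : Lex (Int × Lex (String × String)) :=
  toLex (x.1, toLex (x.2.1, x.2.2))

-- a 3-combination (a Python tuple) is kept as a 3-element List String inside the dicts and
-- converted to the result triple at the very end (the `_` case is unreachable).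
def pvTripleA (p : List String) : String × String × String :=
  match p with
  | [a, b, c] => (a, b, c)
  | _ => ("", "", "")

-- A's inner `for comb in combs:` iterates a Python set (hash order); the port iterates the
-- PySem.Set in insertion order — exact here because the returned value (the unique minimum
-- under an injective sort key) does not depend on that order.
def mostVisitedPattern1 (username : List String) (website : List String) (timestamp : List Int) : String × String × String :=
  let TUW := timestamp.zip (username.zip website)
  let sortedTUW := PySem.List.sorted TUW pvKeyTUW
  let userHistory := sortedTUW.foldl
    (fun d x => d.modify x.2.1 [] (fun l => l ++ [x.2.2])) PySem.Dict.empty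
  let patternCount := userHistory.keys.foldl
    (fun pc user =>
      (PySem.Set.ofList (PySem.List.combinations (userHistory.getD user []) 3)).foldl
        (fun pc comb => pc.insert comb (pc.getD comb 0 + 1)) pc)
    (PySem.Dict.empty : PySem.Dict (List String) Int)
  let sortedPatternCount := PySem.List.sorted patternCount.keys
    (fun p => toLex (-(patternCount.getD p 0), p))
  match sortedPatternCount with
  | p :: _ => pvTripleA p
  | [] => ("", "", "")  -- unreachable under Pre_ (Python raises IndexError)

-- ===== PORT B =====
def pvTripleB (p : List String) : String × String × String :=
  match p with
  | [a, b, c] => (a, b, c)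
  | _ => ("", "", "")

-- Source B's `_contains(h, p)` — `it = iter(h); all(w in it for w in p)`: each `w in it` consumes
-- the iterator up to and including the first match, so this is exactly the greedy scan below.
def pvContains : List String → List String → Bool
  | _, [] => true
  | [], _ :: _ => false
  | x :: hs, w :: ps => if x == w then pvContains hs ps else pvContains hs (w :: ps)

-- Source B's `min` over a set iterates in hash order; the port iterates the PySem.Set in insertion
-- order — exact here because the minimum under this injective key is unique.
def mostVisitedPattern1_alt (username : List String) (website : List String) (timestamp : List Int) : String × String × String :=
  let visits := timestamp.zip (username.zip website)
  let users := PySem.Set.ofList (visits.map (fun x => x.2.1))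
  let hists := users.map (fun u =>
    (PySem.List.sorted ((visits.filter (fun x => x.2.1 == u)).map (fun x => (x.1, x.2.2)))
      (fun pr => toLex pr)).map (fun pr => pr.2))
  let candidates := PySem.Set.ofList (hists.flatMap (fun h => PySem.List.combinations h 3))
  let count := fun p => (List.countP (fun h => pvContains h p) hists : Int)
  match PySem.List.min? candidates (fun p => toLex (-(count p), p)) with
  | some p => pvTripleB p
  | none => ("", "", "")  -- unreachable under Pre_ (Python raises ValueError)

-- ===== PRECONDITION & SPEC =====
-- Pre_ excludes exactly the inputs where no user has three (zipped) visits: there are no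
-- 3-patterns, A raises IndexError, B raises ValueError.
def Pre_mostVisitedPattern1 (username : List String) (website : List String) (timestamp : List Int) : Prop :=
  ((timestamp.zip (username.zip website)).map (fun x => x.2.1)).any
    (fun u => 3 ≤ ((timestamp.zip (username.zip website)).map (fun x => x.2.1)).count u) = true
instance (username : List String) (website : List String) (timestamp : List Int) : Decidable (Pre_mostVisitedPattern1 username website timestamp) := by unfold Pre_mostVisitedPattern1; infer_instance

def pvWitness_mostVisitedPattern1 : List String × List String × List Int :=
  (["a", "a", "a"], ["x", "y", "z"], [1, 2, 3])

def Spec_mostVisitedPattern1 (username : List String) (website : List String) (timestamp : List Int) (out : String × String × String) : Prop := out = mostVisitedPattern1_alt username website timestamp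
instance (username : List String) (website : List String) (timestamp : List Int) (out : String × String × String) : Decidable (Spec_mostVisitedPattern1 username website timestamp out) := by unfold Spec_mostVisitedPattern1; infer_instance

-- ===== CLAIM (what is proved, stated in full; the proofs are below) =====
def Claim_equal_mostVisitedPattern1 : Prop := ∀ (username : List String) (website : List String) (timestamp : List Int), Dom_mostVisitedPattern1 username website timestamp → Pre_mostVisitedPattern1 username website timestamp → Spec_mostVisitedPattern1 username website timestamp (mostVisitedPattern1 username website timestamp)

-- ===== LEMMAS AND PROOFS =====

-- abbreviations for the proof (T is the zipped triple list)
def pvSortedT (T : List (Int × String × String)) : List (Int × String × String) :=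
  PySem.List.sorted T pvKeyTUW

def pvHistA (T : List (Int × String × String)) (u : String) : List String :=
  ((pvSortedT T).filter (fun x => x.2.1 == u)).map (fun x => x.2.2)

theorem pvUserHistory_getD (T : List (Int × String × String)) (u : String) :
    ((pvSortedT T).foldl (fun d x => d.modify x.2.1 [] (fun l => l ++ [x.2.2]))
      PySem.Dict.empty).getD u [] = pvHistA T u := by
  have h := PySem.Dict.getD_foldl_modify_append ((pvSortedT T).map (fun x => (x.2.1, x.2.2)))
    PySem.Dict.empty u
  rw [List.foldl_map] at h
  simpa [pvHistA, List.filter_map, Function.comp] using h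

theorem pvUserHistory_keys (T : List (Int × String × String)) :
    ((pvSortedT T).foldl (fun d x => d.modify x.2.1 [] (fun l => l ++ [x.2.2]))
      PySem.Dict.empty).keys = PySem.Set.ofList ((pvSortedT T).map (fun x => x.2.1)) := by
  have h := PySem.Dict.keys_foldl_modify_key (pvSortedT T) (fun x => x.2.1) []
    (fun _ x l => l ++ [x.2.2]) PySem.Dict.empty
  simpa [PySem.Set.update_empty] using h

theorem pvKey_le_of (a b : Int × String × String) (h : pvKeyTUW a ≤ pvKeyTUW b)
    (he : a.2.1 = b.2.1) : toLex (a.1, a.2.2) ≤ toLex (b.1, b.2.2) := by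
  simp only [pvKeyTUW, Prod.Lex.le_iff, ofLex_toLex] at h ⊢
  rcases h with h1 | ⟨h1, h2 | ⟨_, h3⟩⟩
  · exact Or.inl h1
  · exact absurd (he ▸ h2) (lt_irrefl _)
  · exact Or.inr ⟨h1, h3⟩

theorem pvHist_eq (T : List (Int × String × String)) (u : String) :
    (PySem.List.sorted ((T.filter (fun x => x.2.1 == u)).map (fun x => (x.1, x.2.2)))
        (fun pr => toLex pr)).map (fun pr => pr.2) = pvHistA T u := by
  have hmain : PySem.List.sorted ((T.filter (fun x => x.2.1 == u)).map (fun x => (x.1, x.2.2)))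
      (fun pr => toLex pr)
      = ((pvSortedT T).filter (fun x => x.2.1 == u)).map (fun x => (x.1, x.2.2)) := by
    apply List.Perm.eq_of_pairwise (le := fun a b => toLex a ≤ toLex b)
    · intro a b _ _ h1 h2
      exact toLex.injective (le_antisymm h1 h2)
    · exact PySem.List.sorted_pairwise _ _
    · apply List.pairwise_map.mpr
      refine List.Pairwise.imp_of_mem ?_
        ((PySem.List.sorted_pairwise T pvKeyTUW).filter (fun x => x.2.1 == u))
      intro a b ha hb h
      exact pvKey_le_of a b h
        ((eq_of_beq (List.mem_filter.mp ha).2).trans (eq_of_beq (List.mem_filter.mp hb).2).symm)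
    · exact (PySem.List.sorted_perm _ _ _).trans
        ((((PySem.List.sorted_perm T pvKeyTUW false).filter _).map _).symm)
  rw [hmain, List.map_map, pvHistA]
  rfl

-- the greedy first-match scan decides the subsequence relation
theorem pvContains_iff (h p : List String) : pvContains h p = true ↔ p.Sublist h := by
  induction h generalizing p with
  | nil => cases p <;> simp [pvContains]
  | cons x hs ih =>
    cases p with
    | nil => simp [pvContains]
    | cons w ps =>
      by_cases hxw : x = w
      · subst hxw
        simp [pvContains, ih, List.cons_sublist_cons]
      · have hb : (x == w) = false := beq_eq_false_iff_ne.mpr hxw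
        have hstep : pvContains (x :: hs) (w :: ps) = pvContains hs (w :: ps) := by
          simp [pvContains, hb]
        rw [hstep, ih]
        constructor
        · exact fun hsub => hsub.cons x
        · intro hsub
          cases hsub with
          | cons _ hsub => exact hsub
          | cons₂ _ hsub => exact absurd rfl hxw

theorem pvCounts_getD (S : String → List (List String)) (hS : ∀ u, (S u).Nodup)
    (U : List String) (d : PySem.Dict (List String) Int) (p : List String) :
    (U.foldl (fun c u => (S u).foldl (fun c q => c.insert q (c.getD q 0 + 1)) c) d).getD p 0
      = d.getD p 0 + (U.countP (fun u => decide (p ∈ S u)) : Int) := by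
  induction U generalizing d with
  | nil => simp
  | cons u U ih =>
    rw [List.foldl_cons, ih, PySem.Dict.getD_foldl_insert_add_one, List.countP_cons]
    by_cases h : p ∈ S u
    · rw [List.count_eq_one_of_mem (hS u) h]
      simp [h]; ring
    · rw [List.count_eq_zero_of_not_mem h]
      simp [h]

theorem pvCounts_mem_keys (S : String → List (List String)) (U : List String)
    (d : PySem.Dict (List String) Int) (p : List String) :
    (p ∈ (U.foldl (fun c u => (S u).foldl (fun c q => c.insert q (c.getD q 0 + 1)) c) d).keys)
      ↔ (p ∈ d.keys ∨ ∃ u ∈ U, p ∈ S u) := by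
  induction U generalizing d with
  | nil => simp
  | cons u U ih =>
    rw [List.foldl_cons, ih, PySem.Dict.keys_foldl_insert, PySem.Set.mem_update]
    constructor
    · rintro (⟨h | h⟩ | h)
      · exact Or.inl h
      · exact Or.inr ⟨u, by simp, h⟩
      · rcases h with ⟨v, hv, hp⟩; exact Or.inr ⟨v, by simp [hv], hp⟩
    · rintro (h | ⟨v, hv, hp⟩)
      · exact Or.inl (Or.inl h)
      · rcases List.mem_cons.mp hv with rfl | hv
        · exact Or.inl (Or.inr hp)
        · exact Or.inr ⟨v, hv, hp⟩

-- ===== VERDICT (by name: the statement is the Claim_ definition above) =====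
theorem mostVisitedPattern1_spec : Claim_equal_mostVisitedPattern1 := by
  intro username website timestamp _hdom hpre
  unfold Pre_mostVisitedPattern1 at hpre
  simp only [Spec_mostVisitedPattern1, mostVisitedPattern1, mostVisitedPattern1_alt]
  set T := timestamp.zip (username.zip website) with hT
  rw [show PySem.List.sorted T pvKeyTUW = pvSortedT T from rfl]
  rw [pvUserHistory_keys]
  simp only [pvUserHistory_getD, pvHist_eq]
  set S : String → List (List String) :=
    fun u => PySem.Set.ofList (PySem.List.combinations (pvHistA T u) 3) with hSdef
  set UA := PySem.Set.ofList ((pvSortedT T).map (fun x => x.2.1)) with hUA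
  set UB := PySem.Set.ofList (T.map (fun x => x.2.1)) with hUB
  set dA := UA.foldl (fun c u => (S u).foldl (fun c q => c.insert q (c.getD q 0 + 1)) c)
    (PySem.Dict.empty : PySem.Dict (List String) Int) with hdA
  have hSnod : ∀ u, (S u).Nodup := fun u => PySem.Set.nodup_ofList _
  have hUmem : ∀ u, u ∈ UA ↔ u ∈ UB := by
    intro u
    simp [hUA, hUB, PySem.Set.mem_ofList, List.mem_map, PySem.List.mem_sorted, pvSortedT]
  have hUperm : UA.Perm UB :=
    (List.perm_ext_iff_of_nodup (PySem.Set.nodup_ofList _) (PySem.Set.nodup_ofList _)).mpr hUmem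
  -- every key of A's dict is a 3-pattern
  have hSlen : ∀ u p, p ∈ S u → p.length = 3 := by
    intro u p hp
    rw [hSdef, PySem.Set.mem_ofList, PySem.List.mem_combinations_iff] at hp
    exact hp.2
  -- B's count of a 3-pattern equals A's dict entry
  have hcount : ∀ p : List String, p.length = 3 →
      (List.countP (fun h => pvContains h p) (UB.map (pvHistA T)) : Int) = dA.getD p 0 := by
    intro p hlen
    rw [hdA, pvCounts_getD S hSnod UA, List.countP_map,
      hUperm.countP_eq (fun u => decide (p ∈ S u))]
    have : ∀ u : String, (fun h => pvContains h p) (pvHistA T u) = decide (p ∈ S u) := by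
      intro u
      rw [Bool.eq_iff_iff, pvContains_iff, decide_eq_true_iff]
      simp [hSdef, PySem.Set.mem_ofList, PySem.List.mem_combinations_iff, hlen]
    simp only [Function.comp_def, this]
    simp [PySem.Dict.getD_empty]
  -- B's candidate set has exactly A's keys
  have hkeys : ∀ p, p ∈ dA.keys ↔
      p ∈ PySem.Set.ofList ((UB.map (pvHistA T)).flatMap (fun h => PySem.List.combinations h 3)) := by
    intro p
    rw [hdA, pvCounts_mem_keys, PySem.Set.mem_ofList, List.mem_flatMap]
    constructor
    · rintro (h | ⟨u, hu, hp⟩)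
      · simp [PySem.Dict.keys_empty] at h
      · refine ⟨pvHistA T u, List.mem_map_of_mem ((hUmem u).mp hu), ?_⟩
        rw [hSdef, PySem.Set.mem_ofList] at hp
        exact hp
    · rintro ⟨h, hh, hp⟩
      rcases List.mem_map.mp hh with ⟨u, hu, rfl⟩
      exact Or.inr ⟨u, (hUmem u).mpr hu, by rw [hSdef, PySem.Set.mem_ofList]; exact hp⟩
  have hklen : ∀ p, p ∈ dA.keys → p.length = 3 := by
    intro p hp
    rw [hdA, pvCounts_mem_keys] at hp
    rcases hp with h | ⟨u, _, hpu⟩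
    · simp [PySem.Dict.keys_empty] at h
    · exact hSlen u p hpu
  -- a pattern exists: some user has at least three visits
  simp only [List.any_eq_true, decide_eq_true_eq] at hpre
  obtain ⟨u0, hu0mem, hu0cnt⟩ := hpre
  have hlen : 3 ≤ (pvHistA T u0).length := by
    have h1 : (pvHistA T u0).length = List.countP (fun x => x.2.1 == u0) (pvSortedT T) := by
      simp [pvHistA, ← List.countP_eq_length_filter]
    have h2 : List.countP (fun x => x.2.1 == u0) (pvSortedT T)
        = List.countP (fun x => x.2.1 == u0) T :=
      (PySem.List.sorted_perm T pvKeyTUW false).countP_eq _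
    have h3 : (T.map (fun x => x.2.1)).count u0 = List.countP (fun x => x.2.1 == u0) T := by
      rw [List.count, List.countP_map]; rfl
    omega
  have hp0 : (pvHistA T u0).take 3 ∈ S u0 := by
    rw [hSdef, PySem.Set.mem_ofList, PySem.List.mem_combinations_iff]
    exact ⟨List.take_sublist _ _, by rw [List.length_take]; omega⟩
  have hu0B : u0 ∈ UB := by rw [hUB, PySem.Set.mem_ofList]; exact hu0mem
  have hp0A : (pvHistA T u0).take 3 ∈ dA.keys := by
    rw [hdA, pvCounts_mem_keys]
    exact Or.inr ⟨u0, (hUmem u0).mpr hu0B, hp0⟩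
  -- final selection: head of A's sort = B's min (the sort key is injective)
  cases hsort : PySem.List.sorted dA.keys (fun p => toLex (-(dA.getD p 0), p)) with
  | nil =>
    exact absurd ((PySem.List.sorted_eq_nil_iff _ _ _).mp hsort ▸ hp0A) (List.not_mem_nil)
  | cons m t =>
    cases hmin : PySem.List.min?
        (PySem.Set.ofList ((UB.map (pvHistA T)).flatMap (fun h => PySem.List.combinations h 3)))
        (fun p => toLex (-(List.countP (fun h => pvContains h p) (UB.map (pvHistA T)) : Int), p)) with
    | none =>
      exact absurd (((PySem.List.min?_eq_none_iff _ _).mp hmin) ▸ ((hkeys _).mp hp0A))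
        (List.not_mem_nil)
    | some m' =>
      have hm_mem : m ∈ dA.keys :=
        (PySem.List.mem_sorted _ _ _ m).mp (hsort ▸ List.mem_cons_self)
      have hm'_mem : m' ∈ dA.keys := (hkeys m').mpr (PySem.List.min?_mem hmin)
      have h1 : toLex (-(dA.getD m 0), m) ≤ toLex (-(dA.getD m' 0), m') :=
        PySem.List.key_head_sorted_le _ _ hsort m' hm'_mem
      have h2 : toLex (-(List.countP (fun h => pvContains h m') (UB.map (pvHistA T)) : Int), m')
          ≤ toLex (-(List.countP (fun h => pvContains h m) (UB.map (pvHistA T)) : Int), m) :=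
        PySem.List.min?_isMin hmin m ((hkeys m).mp hm_mem)
      rw [hcount m (hklen m hm_mem), hcount m' (hklen m' hm'_mem)] at h2
      have hmm : m = m' := congrArg (fun z => (ofLex z).2) (toLex.injective (le_antisymm h1 h2))
      rw [hmm]
      rfl
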